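-- pv_equiv track=rewrite | github.com/maxcohen31/Codewars-Solutions | Codewars/Simple_division_6_kyu.py | solve
-- ===== SOURCE A (Python) =====
-- def solve(a, b):
--     b_prime_factors = []
--     start = 2
--     while start <= b:
--         if b % start == 0:
--             b_prime_factors.append(start)
--             b = b // start
--         else:
--             start += 1
--     for prime in b_prime_factors:
--         f = a % prime
--         if f != 0:
--             return False
--     return True
-- ===== SOURCE B (Python) =====
-- def solve(a, b):
--     d = 2
--     while d * d <= b:
--         if b % d == 0:
--             if a % d != 0:
--                 return False
--             while b % d == 0:
--                 b //= d
--         d += 1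
--     if b > 1 and a % b != 0:
--         return False
--     return True
-- ===== Notes on version B (the rewrite author's own statement) =====
-- stated objective: faster
-- what changed: B trial-divides only up to sqrt(b), stripping each found prime and checking it against a immediately, with the leftover cofactor > 1 treated as the last prime, instead of A's full factorization by trial division up to b itself.
import Mathlib
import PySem

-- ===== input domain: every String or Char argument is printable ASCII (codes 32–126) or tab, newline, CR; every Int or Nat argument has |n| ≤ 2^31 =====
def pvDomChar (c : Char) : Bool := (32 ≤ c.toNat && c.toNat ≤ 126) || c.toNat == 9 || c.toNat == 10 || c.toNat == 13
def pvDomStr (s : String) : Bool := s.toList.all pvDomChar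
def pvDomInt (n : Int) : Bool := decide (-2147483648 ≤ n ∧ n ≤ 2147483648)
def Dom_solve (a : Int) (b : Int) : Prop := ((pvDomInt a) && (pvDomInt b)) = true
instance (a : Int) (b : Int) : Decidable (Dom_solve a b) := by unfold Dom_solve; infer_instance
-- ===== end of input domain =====

-- B trial-divides only up to sqrt(b) (stripping each prime and checking it against a at once,
-- remaining cofactor > 1 treated as the last prime) instead of A's full trial division up to b.


-- ===== PORT A =====
-- A's while-loop: collect the prime factors of b by trial division starting at 2.
-- The fuel argument only makes the recursion total: the loop measure b.toNat + (b-start).toNat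
-- drops each iteration, so the initial fuel passed by solve is never exhausted.
def solveFactorFuel : Nat → Int → Int → List Int → List Int
  | 0, _, _, acc => acc
  | fuel + 1, b, start, acc =>
    if start ≤ b then
      if PySem.Int.mod b start = 0 then
        solveFactorFuel fuel (PySem.Int.floordiv b start) start (acc ++ [start])
      else
        solveFactorFuel fuel b (start + 1) acc
    else acc

def solve (a : Int) (b : Int) : Bool :=
  (solveFactorFuel (b.toNat + (b - 2).toNat + 1) b 2 []).all
    (fun p => PySem.Int.mod a p == 0)

-- ===== PORT B =====
-- inner "while b % d == 0: b //= d"; fuel b.toNat suffices since b shrinks every iteration.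
def stripFuel : Nat → Int → Int → Int
  | 0, b, _ => b
  | fuel + 1, b, d =>
    if 0 < b ∧ PySem.Int.mod b d = 0 then
      stripFuel fuel (PySem.Int.floordiv b d) d
    else b

-- outer "while d*d <= b" loop of B, then the final cofactor check;
-- the fuel again only makes the recursion total (measure (b-d).toNat drops each iteration).
def solveAltGoFuel : Nat → Int → Int → Int → Bool
  | 0, _, _, _ => true
  | fuel + 1, a, b, d =>
    if d * d ≤ b then
      if PySem.Int.mod b d = 0 then
        if PySem.Int.mod a d ≠ 0 then false
        else solveAltGoFuel fuel a (stripFuel b.toNat b d) (d + 1)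
      else solveAltGoFuel fuel a b (d + 1)
    else
      if 1 < b ∧ PySem.Int.mod a b ≠ 0 then false else true

def solve_alt (a : Int) (b : Int) : Bool :=
  solveAltGoFuel ((b - 2).toNat + 1) a b 2

-- ===== PRECONDITION & SPEC =====
def Spec_solve (a : Int) (b : Int) (out : Bool) : Prop := out = solve_alt a b
instance (a : Int) (b : Int) (out : Bool) : Decidable (Spec_solve a b out) := by unfold Spec_solve; infer_instance

-- ===== CLAIM (what is proved, stated in full; the proofs are below) =====
def Claim_equal_solve : Prop := ∀ (a : Int) (b : Int), Dom_solve a b → Spec_solve a b (solve a b)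

-- ===== LEMMAS AND PROOFS =====

-- positive primes of Int: minimal-divisor primality and the sqrt bound
theorem minDvd_prime (b s : Int) (h2 : 2 ≤ s) (hdvd : s ∣ b)
    (inv : ∀ e : Int, 2 ≤ e → e < s → ¬ e ∣ b) : Prime s := by
  rw [Int.prime_iff_natAbs_prime]
  rw [Nat.prime_def_lt]
  constructor
  · omega
  · intro m hm hmd
    by_contra hne
    have hm2 : 2 ≤ m := by
      rcases Nat.lt_or_ge m 2 with h | h
      · interval_cases m
        · simp at hmd; omega
        · omega
      · exact h
    have hmz : (m : Int) ∣ s := by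
      have := Int.natCast_dvd_natCast.mpr hmd
      rwa [Int.natAbs_of_nonneg (by omega)] at this
    exact inv m (by exact_mod_cast hm2) (by omega) (hmz.trans hdvd)

theorem prime_eq_of_dvd (p q : Int) (hp : 0 < p) (hpp : Prime p) (hq : 0 < q) (hqq : Prime q)
    (h : p ∣ q) : p = q := by
  rw [Int.prime_iff_natAbs_prime] at hpp hqq
  have := (Nat.prime_dvd_prime_iff_eq hpp hqq).mp (Int.natAbs_dvd_natAbs.mpr h)
  omega

theorem prime_of_no_small (b d : Int) (hb : 2 ≤ b) (hd : 2 ≤ d) (hlt : b < d * d)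
    (inv : ∀ e : Int, 2 ≤ e → e < d → ¬ e ∣ b) : Prime b := by
  rw [Int.prime_iff_natAbs_prime]
  rw [Nat.prime_def_le_sqrt]
  refine ⟨by omega, ?_⟩
  intro m hm2 hms hmd
  have hmm : m * m ≤ b.natAbs := Nat.le_sqrt.mp hms
  have hmmz : (m : Int) * (m : Int) ≤ b := by
    have h0 : ((m * m : Nat) : Int) ≤ (b.natAbs : Int) := by exact_mod_cast hmm
    rw [Int.natAbs_of_nonneg (by omega)] at h0
    push_cast at h0
    exact h0
  have hmd2 : (m : Int) < d := by nlinarith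
  have hmz : (m : Int) ∣ b := by
    have := Int.natCast_dvd_natCast.mpr hmd
    rwa [Int.natAbs_of_nonneg (by omega)] at this
  exact inv m (by exact_mod_cast hm2) hmd2 hmz

-- exact division by a divisor d ≥ 2 of a positive b: positivity, strict shrink, divisibility
theorem pvQuot_pos (b d : Int) (hd : 2 ≤ d) (hb : 0 < b) (hdvd : d ∣ b) :
    0 < PySem.Int.floordiv b d := by
  rw [PySem.Int.floordiv_eq_ediv_of_pos (by omega)]
  exact Int.ediv_pos_of_pos_of_dvd hb (by omega) hdvd

theorem pvQuot_lt (b d : Int) (hd : 2 ≤ d) (hb : 0 < b) :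
    PySem.Int.floordiv b d < b := by
  rw [PySem.Int.floordiv_eq_ediv_of_pos (by omega)]
  rw [Int.ediv_lt_iff_lt_mul (by omega)]
  nlinarith

theorem pvQuot_dvd (b d : Int) (hd : 2 ≤ d) (hdvd : d ∣ b) :
    PySem.Int.floordiv b d ∣ b := by
  rw [PySem.Int.floordiv_eq_ediv_of_pos (by omega)]
  exact Int.ediv_dvd_of_dvd hdvd

theorem pvQuot_mul (b d : Int) (hd : 2 ≤ d) (hdvd : d ∣ b) :
    PySem.Int.floordiv b d * d = b := by
  rw [PySem.Int.floordiv_eq_ediv_of_pos (by omega)]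
  exact Int.ediv_mul_cancel hdvd

-- A's factor list holds exactly the positive primes dividing b (plus the accumulator),
-- for any fuel exceeding the loop measure
theorem solveFactorFuel_mem :
    ∀ (f : Nat) (b start : Int) (acc : List Int), 2 ≤ start → 1 ≤ b →
    b.toNat + (b - start).toNat < f →
    (∀ e : Int, 2 ≤ e → e < start → ¬ e ∣ b) →
    ∀ p : Int, p ∈ solveFactorFuel f b start acc ↔ p ∈ acc ∨ (0 < p ∧ Prime p ∧ p ∣ b) := by
  intro f
  induction f with
  | zero => intro b start acc h2 hb hf; omega
  | succ f ih =>
    intro b start acc h2 hb hf inv p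
    rw [solveFactorFuel]
    by_cases hle : start ≤ b
    · rw [if_pos hle]
      by_cases hm : PySem.Int.mod b start = 0
      · rw [if_pos hm]
        have hdvd : start ∣ b := (PySem.Int.mod_eq_zero_iff_dvd b start).mp hm
        have hq1 : 0 < PySem.Int.floordiv b start := pvQuot_pos b start h2 (by omega) hdvd
        have hqlt : PySem.Int.floordiv b start < b := pvQuot_lt b start h2 (by omega)
        have hqdvd : PySem.Int.floordiv b start ∣ b := pvQuot_dvd b start h2 hdvd
        have hsprime : Prime start := minDvd_prime b start h2 hdvd inv
        have inv2 : ∀ e : Int, 2 ≤ e → e < start → ¬ e ∣ PySem.Int.floordiv b start :=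
          fun e he1 he2 hed => inv e he1 he2 (hed.trans hqdvd)
        rw [ih (PySem.Int.floordiv b start) start (acc ++ [start]) h2 (by omega) (by omega)
          inv2 p, List.mem_append, List.mem_singleton]
        constructor
        · rintro ((hp | hp) | ⟨hp0, hpp, hpd⟩)
          · exact Or.inl hp
          · exact Or.inr ⟨by omega, hp ▸ hsprime, hp ▸ hdvd⟩
          · exact Or.inr ⟨hp0, hpp, hpd.trans hqdvd⟩
        · rintro (hp | ⟨hp0, hpp, hpd⟩)
          · exact Or.inl (Or.inl hp)
          · by_cases hps : p = start
            · exact Or.inl (Or.inr hps)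
            · refine Or.inr ⟨hp0, hpp, ?_⟩
              have hpq : p ∣ PySem.Int.floordiv b start * start := by
                rw [pvQuot_mul b start h2 hdvd]; exact hpd
              rcases hpp.dvd_mul.mp hpq with hcase | hcase
              · exact hcase
              · exact absurd (prime_eq_of_dvd p start hp0 hpp (by omega) hsprime hcase) hps
      · rw [if_neg hm]
        have hne : start ≠ b := by
          intro he
          exact hm ((PySem.Int.mod_eq_zero_iff_dvd b start).mpr (he ▸ dvd_rfl))
        have inv2 : ∀ e : Int, 2 ≤ e → e < start + 1 → ¬ e ∣ b := by
          intro e he1 he2 hed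
          rcases eq_or_lt_of_le (show e ≤ start by omega) with he | he
          · exact hm (he ▸ (PySem.Int.mod_eq_zero_iff_dvd b start).mpr (he ▸ hed))
          · exact inv e he1 he hed
        exact ih b (start + 1) acc (by omega) hb (by omega) inv2 p
    · rw [if_neg hle]
      have hb1 : b = 1 := by
        by_contra hne
        exact inv b (by omega) (by omega) dvd_rfl
      subst hb1
      constructor
      · exact Or.inl
      · rintro (hp | ⟨hp0, hpp, hpd⟩)
        · exact hp
        · exact absurd (isUnit_of_dvd_one hpd) hpp.not_unit

-- A returns True iff every positive prime dividing b divides a (for 1 ≤ b)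
theorem solve_iff (a b : Int) (hb : 1 ≤ b) :
    solve a b = true ↔ ∀ p : Int, 0 < p → Prime p → p ∣ b → p ∣ a := by
  unfold solve
  rw [List.all_eq_true]
  have hmem := solveFactorFuel_mem (b.toNat + (b - 2).toNat + 1) b 2 [] (by norm_num) hb
    (by omega) (by intro e he1 he2; exfalso; omega)
  constructor
  · intro hall p hp0 hpp hpd
    have := hall p ((hmem p).mpr (Or.inr ⟨hp0, hpp, hpd⟩))
    rw [beq_iff_eq, PySem.Int.mod_eq_zero_iff_dvd] at this
    exact this
  · intro hall p hp
    rcases (hmem p).mp hp with hc | ⟨hp0, hpp, hpd⟩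
    · simp at hc
    · rw [beq_iff_eq, PySem.Int.mod_eq_zero_iff_dvd]
      exact hall p hp0 hpp hpd

-- facts about stripFuel (always used with d ≥ 2; the fuel covers the iterations)
theorem stripFuel_pos : ∀ (f : Nat) (b d : Int), 2 ≤ d → 0 < b → 0 < stripFuel f b d := by
  intro f
  induction f with
  | zero => intro b d hd hb; exact hb
  | succ f ih =>
    intro b d hd hb
    rw [stripFuel]
    by_cases hc : 0 < b ∧ PySem.Int.mod b d = 0
    · rw [if_pos hc]
      exact ih _ d hd (pvQuot_pos b d hd hb ((PySem.Int.mod_eq_zero_iff_dvd b d).mp hc.2))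
    · rw [if_neg hc]; exact hb

theorem stripFuel_le : ∀ (f : Nat) (b d : Int), 2 ≤ d → 0 < b → stripFuel f b d ≤ b := by
  intro f
  induction f with
  | zero => intro b d hd hb; exact le_refl b
  | succ f ih =>
    intro b d hd hb
    rw [stripFuel]
    by_cases hc : 0 < b ∧ PySem.Int.mod b d = 0
    · rw [if_pos hc]
      have hq0 := pvQuot_pos b d hd hb ((PySem.Int.mod_eq_zero_iff_dvd b d).mp hc.2)
      exact le_trans (ih _ d hd hq0) (le_of_lt (pvQuot_lt b d hd hb))
    · rw [if_neg hc]

theorem stripFuel_lt (f : Nat) (b d : Int) (hd : 2 ≤ d) (hb : 0 < b)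
    (hm : PySem.Int.mod b d = 0) (hf : 0 < f) : stripFuel f b d < b := by
  cases f with
  | zero => omega
  | succ f =>
    rw [stripFuel, if_pos ⟨hb, hm⟩]
    have hq0 := pvQuot_pos b d hd hb ((PySem.Int.mod_eq_zero_iff_dvd b d).mp hm)
    exact lt_of_le_of_lt (stripFuel_le f _ d hd hq0) (pvQuot_lt b d hd hb)

theorem stripFuel_dvd : ∀ (f : Nat) (b d : Int), 2 ≤ d → stripFuel f b d ∣ b := by
  intro f
  induction f with
  | zero => intro b d hd; exact dvd_rfl
  | succ f ih =>
    intro b d hd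
    rw [stripFuel]
    by_cases hc : 0 < b ∧ PySem.Int.mod b d = 0
    · rw [if_pos hc]
      exact (ih _ d hd).trans (pvQuot_dvd b d hd ((PySem.Int.mod_eq_zero_iff_dvd b d).mp hc.2))
    · rw [if_neg hc]

-- with fuel at least b.toNat the inner loop removes ALL factors d
theorem stripFuel_ndvd : ∀ (f : Nat) (b d : Int), 2 ≤ d → 0 < b → b.toNat ≤ f →
    ¬ d ∣ stripFuel f b d := by
  intro f
  induction f with
  | zero => intro b d hd hb hf; omega
  | succ f ih =>
    intro b d hd hb hf
    rw [stripFuel]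
    by_cases hc : 0 < b ∧ PySem.Int.mod b d = 0
    · rw [if_pos hc]
      have hq0 := pvQuot_pos b d hd hb ((PySem.Int.mod_eq_zero_iff_dvd b d).mp hc.2)
      have hqlt := pvQuot_lt b d hd hb
      exact ih _ d hd hq0 (by omega)
    · rw [if_neg hc]
      intro hdvd
      exact hc ⟨hb, (PySem.Int.mod_eq_zero_iff_dvd b d).mpr hdvd⟩

theorem stripFuel_dvd_of : ∀ (f : Nat) (b d p : Int), 2 ≤ d → Prime p → ¬ p ∣ d → p ∣ b →
    p ∣ stripFuel f b d := by
  intro f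
  induction f with
  | zero => intro b d p hd hpp hnd hpb; exact hpb
  | succ f ih =>
    intro b d p hd hpp hnd hpb
    rw [stripFuel]
    by_cases hc : 0 < b ∧ PySem.Int.mod b d = 0
    · rw [if_pos hc]
      have hdvd := (PySem.Int.mod_eq_zero_iff_dvd b d).mp hc.2
      refine ih _ d p hd hpp hnd ?_
      have hpq : p ∣ PySem.Int.floordiv b d * d := by
        rw [pvQuot_mul b d hd hdvd]; exact hpb
      rcases hpp.dvd_mul.mp hpq with hcase | hcase
      · exact hcase
      · exact absurd hcase hnd
    · rw [if_neg hc]; exact hpb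

-- B's loop returns True iff every positive prime dividing (the current) b divides a,
-- for any fuel exceeding the loop measure
theorem solveAltGoFuel_iff :
    ∀ (f : Nat) (a b d : Int), 2 ≤ d → 1 ≤ b → (b - d).toNat < f →
    (∀ e : Int, 2 ≤ e → e < d → ¬ e ∣ b) →
    (solveAltGoFuel f a b d = true ↔ ∀ p : Int, 0 < p → Prime p → p ∣ b → p ∣ a) := by
  intro f
  induction f with
  | zero => intro a b d hd hb hf; omega
  | succ f ih =>
    intro a b d hd hb hf inv
    rw [solveAltGoFuel]
    by_cases hc : d * d ≤ b
    · rw [if_pos hc]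
      have hdb : d < b := by nlinarith
      by_cases hm : PySem.Int.mod b d = 0
      · rw [if_pos hm]
        have hdvd : d ∣ b := (PySem.Int.mod_eq_zero_iff_dvd b d).mp hm
        have hdprime : Prime d := minDvd_prime b d hd hdvd inv
        by_cases ha : PySem.Int.mod a d ≠ 0
        · rw [if_pos ha]
          refine iff_of_false (by simp) ?_
          intro hall
          exact ha ((PySem.Int.mod_eq_zero_iff_dvd a d).mpr (hall d (by omega) hdprime hdvd))
        · rw [if_neg ha]
          have hda : d ∣ a := (PySem.Int.mod_eq_zero_iff_dvd a d).mp (not_not.mp ha)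
          have hs0 : 0 < stripFuel b.toNat b d := stripFuel_pos b.toNat b d hd (by omega)
          have hslt : stripFuel b.toNat b d < b :=
            stripFuel_lt b.toNat b d hd (by omega) hm (by omega)
          have hsdvd : stripFuel b.toNat b d ∣ b := stripFuel_dvd b.toNat b d hd
          have inv2 : ∀ e : Int, 2 ≤ e → e < d + 1 → ¬ e ∣ stripFuel b.toNat b d := by
            intro e he1 he2 hed
            rcases eq_or_lt_of_le (show e ≤ d by omega) with he | he
            · exact stripFuel_ndvd b.toNat b d hd (by omega) (le_refl _) (he ▸ hed)
            · exact inv e he1 he (hed.trans hsdvd)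
          rw [ih a (stripFuel b.toNat b d) (d + 1) (by omega) (by omega) (by omega) inv2]
          constructor
          · intro hall p hp0 hpp hpb
            by_cases hpd : p = d
            · exact hpd ▸ hda
            · refine hall p hp0 hpp (stripFuel_dvd_of b.toNat b d p hd hpp ?_ hpb)
              intro hcase
              exact hpd (prime_eq_of_dvd p d hp0 hpp (by omega) hdprime hcase)
          · intro hall p hp0 hpp hpb
            exact hall p hp0 hpp (hpb.trans hsdvd)
      · rw [if_neg hm]
        have inv2 : ∀ e : Int, 2 ≤ e → e < d + 1 → ¬ e ∣ b := by
          intro e he1 he2 hed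
          rcases eq_or_lt_of_le (show e ≤ d by omega) with he | he
          · exact hm (he ▸ (PySem.Int.mod_eq_zero_iff_dvd b d).mpr (he ▸ hed))
          · exact inv e he1 he hed
        exact ih a b (d + 1) (by omega) hb (by omega) inv2
    · rw [if_neg hc]
      by_cases hb1 : b = 1
      · subst hb1
        rw [if_neg (by omega : ¬ ((1:Int) < 1 ∧ PySem.Int.mod a 1 ≠ 0))]
        exact iff_of_true rfl
          (fun p hp0 hpp hpd => absurd (isUnit_of_dvd_one hpd) hpp.not_unit)
      · have hb2 : 2 ≤ b := by omega
        have hbp : Prime b := prime_of_no_small b d hb2 hd (by omega) inv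
        by_cases hba : b ∣ a
        · rw [if_neg (fun hcond => hcond.2 ((PySem.Int.mod_eq_zero_iff_dvd a b).mpr hba))]
          exact iff_of_true rfl
            (fun p hp0 hpp hpd => (prime_eq_of_dvd p b hp0 hpp (by omega) hbp hpd) ▸ hba)
        · rw [if_pos ⟨by omega, fun hmz => hba ((PySem.Int.mod_eq_zero_iff_dvd a b).mp hmz)⟩]
          exact iff_of_false (by simp) (fun hall => hba (hall b (by omega) hbp dvd_rfl))

theorem solve_alt_iff (a b : Int) (hb : 1 ≤ b) :
    solve_alt a b = true ↔ ∀ p : Int, 0 < p → Prime p → p ∣ b → p ∣ a := by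
  unfold solve_alt
  exact solveAltGoFuel_iff ((b - 2).toNat + 1) a b 2 (by norm_num) hb (by omega)
    (by intro e he1 he2; exfalso; omega)

theorem solve_nonpos (a b : Int) (hb : b ≤ 0) : solve a b = true := by
  unfold solve
  rw [solveFactorFuel, if_neg (show ¬((2:Int) ≤ b) by omega)]
  rfl

theorem solve_alt_nonpos (a b : Int) (hb : b ≤ 0) : solve_alt a b = true := by
  unfold solve_alt
  rw [solveAltGoFuel, if_neg (show ¬((2:Int) * 2 ≤ b) by omega), if_neg]
  intro hcond
  omega

-- ===== VERDICT (by name: the statement is the Claim_ definition above) =====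
theorem solve_spec : Claim_equal_solve := by
  intro a b _
  unfold Spec_solve
  by_cases hb : b ≤ 0
  · rw [solve_nonpos a b hb, solve_alt_nonpos a b hb]
  · have hb : 1 ≤ b := by omega
    have h1 := solve_iff a b hb
    have h2 := solve_alt_iff a b hb
    cases hA : solve a b <;> cases hB : solve_alt a b <;> simp_all
    obtain ⟨x, hx1, hx2, hx3, hx4⟩ := h1
    exact hx4 (h2 x hx1 hx2 hx3)
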